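-- pv_equiv track=rewrite | github.com/richard-ps/knowledge_representation | CODE/encoder.py | at_least_one
-- ===== SOURCE A (Python) =====
-- def var(r: int, c: int, v: int, N: int) -> int:
--     return r * N * N + c * N + v
--
-- def at_least_one(N):
--     clauses = []
--
--     for x in range(N):
--         for y in range(N):
--             clause = []
--             for v in range(1, N + 1):
--                 clause.append(var(x, y, v, N))
--             clauses.append(clause)
--
--     return clauses
-- ===== SOURCE B (Python) =====
-- def at_least_one(N):
--     clause = list(range(1, N + 1))
--     clauses = []
--     for _ in range(len(clause) ** 2):
--         clauses.append(clause)
--         clause = [v + N for v in clause]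
--     return clauses
-- ===== Notes on version B (the rewrite author's own statement) =====
-- stated objective: alternative
-- what changed: Replaces the three nested loops and the var() helper by an incremental scheme: the first clause [1..N] is built once, the number of cells is its squared length, and each following clause is the previous one shifted by N.
import Mathlib
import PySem

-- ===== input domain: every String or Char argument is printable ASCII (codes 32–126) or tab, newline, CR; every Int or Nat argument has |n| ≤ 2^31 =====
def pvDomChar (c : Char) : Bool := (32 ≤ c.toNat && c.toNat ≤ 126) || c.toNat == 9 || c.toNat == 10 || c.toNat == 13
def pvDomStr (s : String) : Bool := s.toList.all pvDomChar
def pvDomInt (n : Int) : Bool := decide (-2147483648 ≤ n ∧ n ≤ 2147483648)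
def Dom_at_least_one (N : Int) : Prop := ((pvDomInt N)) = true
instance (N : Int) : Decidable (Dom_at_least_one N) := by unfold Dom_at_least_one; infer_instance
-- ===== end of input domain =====

-- B builds the first clause [1..N] once, takes the squared clause length as the cell count,
-- and derives each following clause by shifting the previous one by N (incremental reuse
-- instead of three nested loops with a var() helper).

-- ===== PORT A =====
def pyvar (r : Int) (c : Int) (v : Int) (N : Int) : Int := r * N * N + c * N + v

def at_least_one (N : Int) : List (List Int) :=
  (PySem.List.pyRange 0 N 1).foldl (fun clauses x =>
    (PySem.List.pyRange 0 N 1).foldl (fun clauses y =>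
      clauses ++ [(PySem.List.pyRange 1 (N + 1) 1).foldl
        (fun clause v => clause ++ [pyvar x y v N]) []]) clauses) []

-- ===== PORT B =====
def at_least_one_alt (N : Int) : List (List Int) :=
  let clause := PySem.List.pyRange 1 (N + 1) 1
  ((PySem.List.pyRange 0 ((clause.length : Int) ^ 2) 1).foldl
    (fun (st : List (List Int) × List Int) _ =>
      (st.1 ++ [st.2], st.2.map (fun v => v + N)))
    ([], clause)).1

-- ===== PRECONDITION & SPEC =====
def Spec_at_least_one (N : Int) (out : List (List Int)) : Prop := out = at_least_one_alt N
instance (N : Int) (out : List (List Int)) : Decidable (Spec_at_least_one N out) := by unfold Spec_at_least_one; infer_instance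

-- ===== CLAIM (what is proved, stated in full; the proofs are below) =====
def Claim_equal_at_least_one : Prop := ∀ (N : Int), Dom_at_least_one N → Spec_at_least_one N (at_least_one N)

-- ===== LEMMAS AND PROOFS =====

-- canonical form both ports are reduced to: the m-th clause is the block N*m+1 .. N*m+N
def canon (N : Int) : List (List Int) :=
  (PySem.List.pyRange 0 (N * N) 1).map
    (fun m => PySem.List.pyRange (N * m + 1) (N * m + N + 1) 1)

-- range (a*b) enumerated as the row-major double loop over range a × range b.
theorem range_mul_flatMap (a b : Nat) :
    List.range (a * b) = (List.range a).flatMap (fun x => (List.range b).map (fun y => x * b + y)) := by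
  induction a with
  | zero => simp
  | succ a ih =>
      rw [Nat.succ_mul, List.range_add, ih, List.range_succ, List.flatMap_append]
      simp [List.flatMap]

theorem flatMap_sing {α β : Type} (f : α → β) (l : List α) :
    l.flatMap (fun x => [f x]) = l.map f := by
  induction l with
  | nil => rfl
  | cons a t ih => simp [List.flatMap_cons, ih]

-- A equals the canonical form (for N ≥ 0).
theorem a_eq_canon (N : Int) (hN : 0 ≤ N) : at_least_one N = canon N := by
  have hNn : ((N.toNat : Int)) = N := Int.toNat_of_nonneg hN
  simp only [at_least_one, canon, PySem.List.foldl_append_eq_flatMap, List.nil_append]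
  rw [PySem.List.pyRange_one 0 N, PySem.List.pyRange_one 1 (N + 1), PySem.List.pyRange_one 0 (N * N)]
  have htn : (N * N - 0).toNat = N.toNat * N.toNat := by
    rw [sub_zero, ← hNn]; exact_mod_cast Int.toNat_natCast (N.toNat * N.toNat)
  have h1 : (N + 1 - 1).toNat = N.toNat := by omega
  have h0 : (N - 0).toNat = N.toNat := by omega
  rw [htn, h1, h0, range_mul_flatMap N.toNat N.toNat]
  simp only [List.flatMap_map, List.map_flatMap, List.map_map, flatMap_sing]
  congr 1; funext x
  simp only [Function.comp_def, List.map_inj_left]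
  intro y _
  rw [PySem.List.pyRange_one]
  have h2 : (N * (0 + ((x * N.toNat + y : Nat) : Int)) + N + 1 - (N * (0 + ((x * N.toNat + y : Nat) : Int)) + 1)).toNat = N.toNat := by
    omega
  rw [h2]
  simp only [List.map_inj_left]
  intro v _
  simp only [pyvar]
  rw [← hNn]
  push_cast [Int.toNat_natCast]
  ring

-- shifting a unit-step pyRange shifts its endpoints
theorem pyRange_shift (a b d : Int) :
    (PySem.List.pyRange a b 1).map (fun v => v + d) = PySem.List.pyRange (a + d) (b + d) 1 := by
  rw [PySem.List.pyRange_one a b, PySem.List.pyRange_one (a + d) (b + d)]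
  have : (b + d - (a + d)).toNat = (b - a).toNat := by omega
  rw [this, List.map_map]
  simp only [List.map_inj_left, Function.comp_def]
  intro i _
  ring

-- the shift-accumulate fold, characterised over any driving list
theorem b_fold (N : Int) (L : List Int) (acc : List (List Int)) (c : List Int) :
    (L.foldl (fun (st : List (List Int) × List Int) _ =>
        (st.1 ++ [st.2], st.2.map (fun v => v + N))) (acc, c)).1
      = acc ++ (List.range L.length).map (fun i : Nat => c.map (fun v => v + (i : Int) * N)) := by
  induction L generalizing acc c with
  | nil => simp
  | cons a t ih =>
      have h0 : List.map (fun v => v + ((0 : Nat) : Int) * N) c = c := by simp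
      have hs : (List.map Nat.succ (List.range t.length)).map
            (fun i : Nat => List.map (fun v => v + (i : Int) * N) c)
          = (List.range t.length).map
            (fun i : Nat => List.map (fun v => v + (i : Int) * N) (List.map (fun v => v + N) c)) := by
        rw [List.map_map]
        apply List.map_congr_left
        intro i _
        rw [List.map_map]
        apply List.map_congr_left
        intro v _
        simp only [Function.comp_def]
        push_cast
        ring
      rw [List.foldl_cons, ih, List.length_cons, List.range_succ_eq_map, List.map_cons, h0, hs]
      simp

-- B equals the canonical form (for N ≥ 0).
theorem b_eq_canon (N : Int) (hN : 0 ≤ N) : at_least_one_alt N = canon N := by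
  have hcl : (PySem.List.pyRange 1 (N + 1) 1).length = N.toNat := by
    rw [PySem.List.pyRange_one, List.length_map, List.length_range]
    omega
  have hsq : ((((PySem.List.pyRange 1 (N + 1) 1).length : Int)) ^ 2) = N * N := by
    rw [hcl, Int.toNat_of_nonneg hN]; ring
  simp only [at_least_one_alt]
  rw [hsq, b_fold, List.nil_append, canon]
  have hlen : (PySem.List.pyRange 0 (N * N) 1).length = (N * N - 0).toNat := by
    rw [PySem.List.pyRange_one, List.length_map, List.length_range]
  rw [hlen, PySem.List.pyRange_one 0 (N * N), List.map_map]
  apply List.map_congr_left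
  intro m _
  rw [pyRange_shift]
  simp only [Function.comp_def]
  congr 1 <;> ring

-- for N < 0 both ports return the empty list
theorem a_neg (N : Int) (hN : N ≤ 0) : at_least_one N = [] := by
  simp [at_least_one, PySem.List.pyRange_one_eq_nil hN]

theorem b_neg (N : Int) (hN : N ≤ 0) : at_least_one_alt N = [] := by
  have h1 : N + 1 ≤ 1 := by omega
  simp [at_least_one_alt, PySem.List.pyRange_one_eq_nil h1,
    PySem.List.pyRange_one_eq_nil (le_refl (0 : Int))]

-- ===== VERDICT (by name: the statement is the Claim_ definition above) =====
theorem at_least_one_spec : Claim_equal_at_least_one := by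
  intro N _
  unfold Spec_at_least_one
  by_cases hN : 0 ≤ N
  · rw [a_eq_canon N hN, b_eq_canon N hN]
  · rw [a_neg N (by omega), b_neg N (by omega)]
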